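-- pv_equiv track=rewrite | github.com/lefarov/cp_playground | practice/meta/slippery_trip.py | getNumCoinsBetweenTurns
-- ===== SOURCE A (Python) =====
-- def getNumCoinsBetweenTurns(row, C):
--     i, j = 0, 0
--     max_coins = 0
--     while i < C:
--         if row[i] == ">":
--             coins = 0
--             j = (i + 1) % C
--             while row[j] != "v" and j != i:
--                 if row[j] == "*":
--                     coins += 1
--
--                 j = (j + 1) % C
--
--             if row[j] == "v":
--                 max_coins = max(coins, max_coins)
--
--             if j > i:
--                 i = j + 1
--                 continue
--             else:
--                 break
--
--         i += 1
--
--     return max_coins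
-- ===== SOURCE B (Python) =====
-- def getNumCoinsBetweenTurns(row, C):
--     # One linear pass: rotate so the walk starts just after the first 'v',
--     # then scan C cells with an "after a '>'" flag and a star counter.
--     cells = [row[k] for k in range(C)]
--     if "v" not in cells:
--         return 0
--     start = cells.index("v")
--     best = 0
--     counting = False
--     coins = 0
--     for step in range(1, C + 1):
--         ch = cells[(start + step) % C]
--         if ch == ">":
--             counting = True
--         elif ch == "*" and counting:
--             coins += 1
--         elif ch == "v":
--             if coins > best:
--                 best = coins
--             counting = False
--             coins = 0
--     return best
-- ===== Notes on version B (the rewrite author's own statement) =====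
-- stated objective: simpler
-- what changed: Replaces A's nested while loops with index jumps, wrap-around inner rescans and break logic by a single linear pass: rotate to start just after the first 'v', then scan the C cells once with an 'after a >' flag and a star counter.
import Mathlib
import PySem

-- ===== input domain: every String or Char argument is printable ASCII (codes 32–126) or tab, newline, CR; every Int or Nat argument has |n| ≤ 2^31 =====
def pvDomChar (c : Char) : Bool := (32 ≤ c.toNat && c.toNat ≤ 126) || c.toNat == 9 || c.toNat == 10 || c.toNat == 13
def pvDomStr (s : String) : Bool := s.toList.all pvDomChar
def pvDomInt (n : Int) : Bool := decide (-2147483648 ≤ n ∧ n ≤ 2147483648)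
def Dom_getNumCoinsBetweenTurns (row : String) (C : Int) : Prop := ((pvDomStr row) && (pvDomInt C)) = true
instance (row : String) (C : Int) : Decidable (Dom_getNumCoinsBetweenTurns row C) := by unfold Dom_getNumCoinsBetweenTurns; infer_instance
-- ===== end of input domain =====

-- B replaces A's nested while loops (inner wrap-around rescan per '>', index jumps, break)
-- by one linear flag-and-counter pass over the circle starting just after the first 'v';
-- equivalence is proved on Pre_ (C ≤ len(row)), exactly the inputs where Python A returns
-- instead of raising IndexError (Python B raises there too).

-- ===== PORT A =====
-- inner `while row[j] != "v" and j != i` loop; fuel bounds the iteration count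
-- (the caller passes fuel = C, enough for the at most C-1 steps the Python loop makes).
-- row[j] is read as `ls.getD j ' '`: exact for in-range j, which Pre_ guarantees.
def innerA (ls : List Char) (c i : Nat) : Nat → Nat → Nat → Nat × Nat
  | 0, j, coins => (coins, j)
  | fuel + 1, j, coins =>
    if ls.getD j ' ' ≠ 'v' ∧ j ≠ i then
      innerA ls c i fuel ((j + 1) % c) (if ls.getD j ' ' = '*' then coins + 1 else coins)
    else (coins, j)

-- outer `while i < C` loop; each iteration strictly increases i, so fuel = C+1 suffices.
def outerA (ls : List Char) (c : Nat) : Nat → Nat → Nat → Nat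
  | 0, _, maxc => maxc
  | fuel + 1, i, maxc =>
    if i < c then
      if ls.getD i ' ' = '>' then
        let p := innerA ls c i c ((i + 1) % c) 0
        let maxc' := if ls.getD p.2 ' ' = 'v' then max p.1 maxc else maxc
        if p.2 > i then outerA ls c fuel (p.2 + 1) maxc' else maxc'
      else outerA ls c fuel (i + 1) maxc
    else maxc

def getNumCoinsBetweenTurns (row : String) (C : Int) : Int :=
  Int.ofNat (outerA row.toList C.toNat (C.toNat + 1) 0 0)

-- ===== PORT B =====
-- one loop-body step of Source B's `for step in range(1, C+1)` pass
def bStep (st : Nat × Bool × Nat) (ch : Char) : Nat × Bool × Nat :=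
  if ch = '>' then (st.1, true, st.2.2)
  else if ch = '*' ∧ st.2.1 then (st.1, st.2.1, st.2.2 + 1)
  else if ch = 'v' then (if st.2.2 > st.1 then st.2.2 else st.1, false, 0)
  else st

def getNumCoinsBetweenTurns_alt (row : String) (C : Int) : Int :=
  -- cells = [row[k] for k in range(C)]  (row[k] read as getD: exact in range, see Pre_)
  let cells := (List.range C.toNat).map (fun k => row.toList.getD k ' ')
  if 'v' ∉ cells then 0
  else
    let start := cells.idxOf 'v'
    -- for step in range(1, C+1): ch = cells[(start + step) % C]   (step = t + 1)
    let res := (List.range C.toNat).foldl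
      (fun st t => bStep st (cells.getD ((start + (t + 1)) % C.toNat) ' ')) (0, false, 0)
    Int.ofNat res.1

-- ===== PRECONDITION & SPEC =====
-- Pre_ excludes exactly the inputs where Python A raises IndexError (C > len(row));
-- Python B raises there as well.
def Pre_getNumCoinsBetweenTurns (row : String) (C : Int) : Prop :=
  C ≤ (row.toList.length : Int)
instance (row : String) (C : Int) : Decidable (Pre_getNumCoinsBetweenTurns row C) := by
  unfold Pre_getNumCoinsBetweenTurns; infer_instance

def pvWitness_getNumCoinsBetweenTurns : String × Int := (">*v*>v", 6)

def Spec_getNumCoinsBetweenTurns (row : String) (C : Int) (out : Int) : Prop := out = getNumCoinsBetweenTurns_alt row C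
instance (row : String) (C : Int) (out : Int) : Decidable (Spec_getNumCoinsBetweenTurns row C out) := by unfold Spec_getNumCoinsBetweenTurns; infer_instance

-- ===== CLAIM (what is proved, stated in full; the proofs are below) =====
def Claim_equal_getNumCoinsBetweenTurns : Prop := ∀ (row : String) (C : Int), Dom_getNumCoinsBetweenTurns row C → Pre_getNumCoinsBetweenTurns row C → Spec_getNumCoinsBetweenTurns row C (getNumCoinsBetweenTurns row C)

-- ===== LEMMAS AND PROOFS =====

def cyc (ls : List Char) (s k : Nat) : List Char :=
  (List.range k).map (fun t => ls.getD ((s + t) % ls.length) ' ')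

theorem cyc_zero (ls : List Char) (s : Nat) : cyc ls s 0 = [] := rfl

theorem cyc_succ (ls : List Char) (s k : Nat) :
    cyc ls s (k + 1) = ls.getD (s % ls.length) ' ' :: cyc ls (s + 1) k := by
  simp only [cyc, List.range_succ_eq_map, List.map_cons, List.map_map, Function.comp_def]
  congr 1
  apply List.map_congr_left
  intro a _
  congr 2
  omega

theorem cyc_length (ls : List Char) (s k : Nat) : (cyc ls s k).length = k := by simp [cyc]

theorem cyc_getElem (ls : List Char) (s k t : Nat) (h : t < k) :
    (cyc ls s k)[t]'(by simp [cyc_length, h]) = ls.getD ((s + t) % ls.length) ' ' := by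
  simp [cyc]

theorem cyc_take (ls : List Char) (s k k' : Nat) :
    (cyc ls s k).take k' = cyc ls s (min k' k) := by
  simp [cyc, ← List.map_take, List.take_range]

theorem cyc_split (ls : List Char) (s k1 k2 : Nat) :
    cyc ls s (k1 + k2) = cyc ls s k1 ++ cyc ls (s + k1) k2 := by
  simp only [cyc, List.range_add, List.map_append, List.map_map, Function.comp_def]
  congr 1
  apply List.map_congr_left; intro t _; congr 2; omega

theorem cyc_mod (ls : List Char) (s k : Nat) : cyc ls s k = cyc ls (s % ls.length) k := by
  simp only [cyc]
  apply List.map_congr_left; intro t _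
  rw [Nat.mod_add_mod]

theorem cyc_lin (ls : List Char) (s k : Nat) (hs : s ≤ ls.length) (hk : k ≤ ls.length - s) :
    cyc ls s k = (ls.drop s).take k := by
  apply List.ext_getElem
  · simp [cyc_length]; omega
  · intro t h1 h2
    rw [cyc_getElem ls s k t (by simpa [cyc_length] using h1)]
    have ht : t < k := by simpa [cyc_length] using h1
    have : (s + t) % ls.length = s + t := Nat.mod_eq_of_lt (by omega)
    rw [this, List.getElem_take, List.getElem_drop]
    rw [List.getD_eq_getElem ls ' ' (by omega)]

theorem modne (i d c : Nat) (hi : i < c) (hd : 0 < d) (hdc : d < c) : (i + d) % c ≠ i := by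
  rcases Nat.lt_or_ge (i + d) c with h | h
  · rw [Nat.mod_eq_of_lt h]; omega
  · have h2 : i + d - c < c := by omega
    rw [Nat.mod_eq_sub_mod h, Nat.mod_eq_of_lt h2]; omega

theorem twgen (p : Char → Bool) (l : List Char) (k : Nat) (hk : k < l.length)
    (hall : ∀ m (hm : m < k), p (l[m]'(by omega)))
    (hstop : ¬ p (l[k]'hk)) : l.takeWhile p = l.take k := by
  induction l generalizing k with
  | nil => simp at hk
  | cons a t ih =>
    cases k with
    | zero => simp at hstop; simp [List.takeWhile_cons, hstop]
    | succ k' =>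
      have ha : p a := hall 0 (by omega)
      simp only [List.takeWhile_cons, ha, List.take_succ_cons, if_true]
      rw [ih k' (by simpa using hk) (fun m hm => hall (m+1) (by omega)) (by simpa using hstop)]

theorem dwgen (p : Char → Bool) (l : List Char) (k : Nat) (hk : k < l.length)
    (hall : ∀ m (hm : m < k), p (l[m]'(by omega)))
    (hstop : ¬ p (l[k]'hk)) : l.dropWhile p = l.drop k := by
  induction l generalizing k with
  | nil => simp at hk
  | cons a t ih =>
    cases k with
    | zero => simp at hstop; simp [List.dropWhile_cons, hstop]
    | succ k' =>
      have ha : p a := hall 0 (by omega)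
      simp only [List.dropWhile_cons, ha, List.drop_succ_cons, if_true]
      rw [ih k' (by simpa using hk) (fun m hm => hall (m+1) (by omega)) (by simpa using hstop)]

theorem twfull (p : Char → Bool) (l : List Char) (hall : ∀ x ∈ l, p x) :
    l.takeWhile p = l := List.takeWhile_eq_self_iff.mpr hall

def Arun (ls : List Char) (i m : Nat) : Nat :=
  outerA ls ls.length (ls.length + 1) i m

-- characterization of the inner loop: it consumes the takeWhile-(≠'v') prefix of the
-- remaining circular scan and stops on the next cell (a 'v' or the starting index i)

theorem inner_char (ls : List Char) (i : Nat) (hi : i < ls.length) :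
    ∀ k t coins, t + k = ls.length - 1 →
    innerA ls ls.length i (k + 1) ((i + 1 + t) % ls.length) coins =
      (coins + ((cyc ls (i + 1 + t) k).takeWhile (· ≠ 'v')).count '*',
       (i + 1 + t + ((cyc ls (i + 1 + t) k).takeWhile (· ≠ 'v')).length) % ls.length) := by
  intro k
  induction k with
  | zero =>
    intro t coins ht
    have hc : 0 < ls.length := by omega
    simp only [cyc_zero, List.takeWhile_nil, List.count_nil, List.length_nil, Nat.add_zero]
    have hji : (i + 1 + t) % ls.length = i := by
      have : i + 1 + t = i + ls.length := by omega
      rw [this, Nat.add_mod_right, Nat.mod_eq_of_lt hi]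
    simp [innerA, hji]
  | succ k ih =>
    intro t coins ht
    have hc : 0 < ls.length := by omega
    have hji : (i + 1 + t) % ls.length ≠ i := by
      have : i + 1 + t = i + (1 + t) := by omega
      rw [this]; exact modne i (1 + t) ls.length hi (by omega) (by omega)
    rw [cyc_succ]
    by_cases hv : ls.getD ((i + 1 + t) % ls.length) ' ' = 'v'
    · have hstop : innerA ls ls.length i (k + 1 + 1) ((i + 1 + t) % ls.length) coins
          = (coins, (i + 1 + t) % ls.length) := by
        simp only [innerA]
        rw [if_neg]
        intro hcon
        exact hcon.1 hv
      rw [hstop, hv]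
      simp
    · have hstep : innerA ls ls.length i (k + 1 + 1) ((i + 1 + t) % ls.length) coins =
          innerA ls ls.length i (k + 1) (((i + 1 + t) % ls.length + 1) % ls.length)
            (if ls.getD ((i + 1 + t) % ls.length) ' ' = '*' then coins + 1 else coins) := by
        simp only [innerA]
        rw [if_pos ⟨hv, hji⟩]
      rw [hstep]
      have hmod : ((i + 1 + t) % ls.length + 1) % ls.length = (i + 1 + (t + 1)) % ls.length := by
        rw [Nat.mod_add_mod]; congr 1 <;> omega
      rw [hmod, ih (t + 1) _ (by omega)]
      have htw : (ls.getD ((i + 1 + t) % ls.length) ' ' :: cyc ls (i + 1 + t + 1) k).takeWhile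
            (fun x => decide (x ≠ 'v')) =
          ls.getD ((i + 1 + t) % ls.length) ' ' :: (cyc ls (i + 1 + t + 1) k).takeWhile
            (fun x => decide (x ≠ 'v')) := by
        rw [List.takeWhile_cons, if_pos (by simpa using hv)]
      rw [htw]
      have hrw : i + 1 + t + 1 = i + 1 + (t + 1) := by omega
      rw [hrw, Prod.mk.injEq]
      refine ⟨?_, ?_⟩
      · by_cases hs : ls.getD ((i + 1 + t) % ls.length) ' ' = '*'
        · rw [hs]
          simp [List.count_cons]
          omega
        · have hs' : ¬ ('*' = ls.getD ((i + 1 + t) % ls.length) ' ') := fun h => hs h.symm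
          rw [if_neg hs]
          simp [List.count_cons, hs']
          exact hs
      · rw [List.length_cons]
        congr 1
        omega

theorem inner_char0 (ls : List Char) (i : Nat) (hi : i < ls.length) :
    innerA ls ls.length i ls.length ((i + 1) % ls.length) 0 =
      (((cyc ls (i + 1) (ls.length - 1)).takeWhile (· ≠ 'v')).count '*',
       (i + 1 + ((cyc ls (i + 1) (ls.length - 1)).takeWhile (· ≠ 'v')).length) % ls.length) := by
  have hc : 0 < ls.length := by omega
  have h := inner_char ls i hi (ls.length - 1) 0 0 (by omega)
  have hfuel : ls.length - 1 + 1 = ls.length := by omega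
  rw [hfuel] at h
  simpa using h

theorem fuel_irrel (ls : List Char) :
    ∀ f1 f2 i m, ls.length - i < f1 → ls.length - i < f2 →
    outerA ls ls.length f1 i m = outerA ls ls.length f2 i m := by
  intro f1
  induction f1 with
  | zero => intro f2 i m h1 h2; omega
  | succ f ih =>
    intro f2 i m h1 h2
    cases f2 with
    | zero => omega
    | succ f2' =>
      simp only [outerA]
      by_cases hic : i < ls.length
      · simp only [hic, if_true]
        by_cases hgt : ls.getD i ' ' = '>'
        · simp only [hgt, if_true]
          set p := innerA ls ls.length i ls.length ((i + 1) % ls.length) 0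
          by_cases hj : p.2 > i
          · simp only [hj, if_pos]
            exact ih f2' (p.2 + 1) _ (by omega) (by omega)
          · simp [hj]
        · simp only [hgt, if_false]
          exact ih f2' (i + 1) m (by omega) (by omega)
      · simp [hic]

theorem Arun_end (ls : List Char) (i m : Nat) (h : ls.length ≤ i) : Arun ls i m = m := by
  unfold Arun outerA
  simp [show ¬ i < ls.length by omega]

theorem Arun_skip (ls : List Char) (i m : Nat) (hi : i < ls.length)
    (hne : ls.getD i ' ' ≠ '>') : Arun ls i m = Arun ls (i + 1) m := by
  unfold Arun
  conv_lhs => rw [show ls.length + 1 = ls.length + 1 from rfl]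
  simp only [outerA, hi, if_true, hne, if_false]
  exact fuel_irrel ls ls.length (ls.length + 1) (i + 1) m (by omega) (by omega)

theorem Arun_proc (ls : List Char) (i m : Nat) (hi : i < ls.length)
    (hgt : ls.getD i ' ' = '>') :
    Arun ls i m =
      (let P := (cyc ls (i + 1) (ls.length - 1)).takeWhile (· ≠ 'v')
       let j := (i + 1 + P.length) % ls.length
       let m' := if ls.getD j ' ' = 'v' then max (P.count '*') m else m
       if j > i then Arun ls (j + 1) m' else m') := by
  unfold Arun
  conv_lhs => simp only [outerA, hi, if_true, hgt]
  rw [inner_char0 ls i hi]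
  simp only []
  set P := (cyc ls (i + 1) (ls.length - 1)).takeWhile (· ≠ 'v') with hP
  set j := (i + 1 + P.length) % ls.length with hj
  by_cases hji : j > i
  · simp only [hji, if_pos]
    exact fuel_irrel ls ls.length (ls.length + 1) (j + 1) _ (by omega) (by omega)
  · simp [hji]

theorem Arun_skipR (ls : List Char) (i b m : Nat) (hib : i ≤ b) (hb : b ≤ ls.length)
    (hno : ∀ x, i ≤ x → x < b → ls.getD x ' ' ≠ '>') : Arun ls i m = Arun ls b m := by
  have hd : ∀ d i', i' + d = b → i' ≥ i → Arun ls i' m = Arun ls b m := by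
    intro d
    induction d with
    | zero => intro i' h _; rw [show i' = b by omega]
    | succ d ih =>
      intro i' h hge
      rw [Arun_skip ls i' m (by omega) (hno i' hge (by omega))]
      exact ih (i' + 1) (by omega) (by omega)
  exact hd (b - i) i (by omega) (by omega)

def gval (l : List Char) : Nat :=
  if '>' ∈ l then ((l.dropWhile (· ≠ '>')).tail).count '*' else 0

def tailVal (sw : Nat) (l : List Char) : Nat :=
  if '>' ∈ l then ((l.dropWhile (· ≠ '>')).tail).count '*' + sw else 0

def linMax (sw : Nat) (l : List Char) : Nat :=
  if h : 'v' ∈ l then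
    max (gval (l.takeWhile (· ≠ 'v'))) (linMax sw ((l.dropWhile (· ≠ 'v')).tail))
  else tailVal sw l
  termination_by l.length
  decreasing_by
    have hne : l.dropWhile (· ≠ 'v') ≠ [] := by
      simp only [ne_eq, List.dropWhile_eq_nil_iff]
      intro hall; exact absurd (hall 'v' h) (by simp)
    have h1 : (l.dropWhile (· ≠ 'v')).length ≤ l.length := List.length_dropWhile_le _ _
    have h2 : ((l.dropWhile (· ≠ 'v')).tail).length < (l.dropWhile (· ≠ 'v')).length := by
      cases hd : l.dropWhile (· ≠ 'v') with
      | nil => exact absurd hd hne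
      | cons a t => simp
    omega

theorem all_ne_of_not_mem (a : Char) (l : List Char) (h : a ∉ l) :
    ∀ x ∈ l, x ≠ a := fun x hx he => h (he ▸ hx)

theorem gval_not_mem (l : List Char) (h : '>' ∉ l) : gval l = 0 := by simp [gval, h]

theorem gval_le_count (l : List Char) : gval l ≤ l.count '*' := by
  unfold gval
  split
  · have hsub : ((l.dropWhile (· ≠ '>')).tail).Sublist l :=
      (List.tail_sublist _).trans (List.dropWhile_sublist _)
    exact hsub.count_le '*'
  · omega

theorem gval_append_left (D Z : List Char) (h : '>' ∈ D) :
    gval (D ++ Z) = ((D.dropWhile (· ≠ '>')).tail).count '*' + Z.count '*' := by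
  have hne : D.dropWhile (· ≠ '>') ≠ [] := by
    simp only [ne_eq, List.dropWhile_eq_nil_iff]
    intro hall; exact absurd (hall '>' h) (by simp)
  rw [gval, if_pos (by simp [h])]
  rw [List.dropWhile_append]
  simp only [List.isEmpty_iff, hne, if_false]
  cases hd : D.dropWhile (· ≠ '>') with
  | nil => exact absurd hd hne
  | cons a t => simp [List.count_append]

theorem gval_append_right (D Z : List Char) (h : '>' ∉ D) :
    gval (D ++ Z) = gval Z := by
  have hnil : D.dropWhile (· ≠ '>') = [] := by
    rw [List.dropWhile_eq_nil_iff]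
    intro x hx
    exact decide_eq_true (all_ne_of_not_mem '>' D h x hx)
  unfold gval
  rw [List.dropWhile_append, hnil]
  simp [h]

theorem linMax_not_mem (sw : Nat) (l : List Char) (h : 'v' ∉ l) :
    linMax sw l = tailVal sw l := by rw [linMax, dif_neg h]

theorem linMax_block (sw : Nat) (X Y : List Char) (h : 'v' ∉ X) :
    linMax sw (X ++ 'v' :: Y) = max (gval X) (linMax sw Y) := by
  have htwX : X.takeWhile (· ≠ 'v') = X :=
    twfull _ X (fun x hx => decide_eq_true (all_ne_of_not_mem 'v' X h x hx))
  have htw : (X ++ 'v' :: Y).takeWhile (· ≠ 'v') = X := by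
    rw [List.takeWhile_append]
    split
    · simp
    · next hfull => exact absurd (by rw [htwX]) hfull
  have hdw : (X ++ 'v' :: Y).dropWhile (· ≠ 'v') = 'v' :: Y := by
    have hnil : X.dropWhile (· ≠ 'v') = [] := by
      rw [List.dropWhile_eq_nil_iff]
      intro x hx
      exact decide_eq_true (all_ne_of_not_mem 'v' X h x hx)
    rw [List.dropWhile_append, hnil]
    simp
  rw [linMax, dif_pos (by simp), htw, hdw]
  simp

theorem linMax_no_gt (sw : Nat) (l : List Char) (h : '>' ∉ l) : linMax sw l = 0 := by
  induction hn : l.length using Nat.strong_induction_on generalizing l with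
  | _ n ih =>
    by_cases hv : 'v' ∈ l
    · rw [linMax, dif_pos hv]
      have h1 : gval (l.takeWhile (· ≠ 'v')) = 0 :=
        gval_not_mem _ (fun hx => h ((List.takeWhile_sublist _).subset hx))
      have h2 : linMax sw ((l.dropWhile (· ≠ 'v')).tail) = 0 := by
        have hne : l.dropWhile (· ≠ 'v') ≠ [] := by
          simp only [ne_eq, List.dropWhile_eq_nil_iff]
          intro hall; exact absurd (hall 'v' hv) (by simp)
        have hlt : ((l.dropWhile (· ≠ 'v')).tail).length < n := by
          have h1' : (l.dropWhile (· ≠ 'v')).length ≤ l.length := List.length_dropWhile_le _ _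
          cases hd : l.dropWhile (· ≠ 'v') with
          | nil => exact absurd hd hne
          | cons a t => rw [hd] at h1'; simp at h1' ⊢; omega
        apply ih _ hlt _ _ rfl
        intro hx
        exact h ((List.dropWhile_sublist _).subset (List.mem_of_mem_tail hx))
      rw [h1, h2]
      simp
    · rw [linMax, dif_neg hv]
      simp [tailVal, h]

theorem linMax_nil (sw : Nat) : linMax sw [] = 0 := by
  rw [linMax, dif_neg (by simp)]
  simp [tailVal]

theorem not_mem_seg (ls : List Char) (ch : Char) (a b : Nat) (hb : b ≤ ls.length)
    (h : ∀ x, a ≤ x → x < b → ls.getD x ' ' ≠ ch) : ch ∉ (ls.drop a).take (b - a) := by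
  intro hmem
  obtain ⟨n, hn, he⟩ := List.mem_iff_getElem.mp hmem
  have hn' : n < b - a := by
    have := hn
    simp at this
    omega
  have hlen : n < (ls.drop a).length := by simp at hn ⊢; omega
  rw [List.getElem_take, List.getElem_drop] at he
  exact h (a + n) (by omega) (by omega) (by rw [List.getD_eq_getElem ls ' ' (by simp at hlen; omega)]; exact he)

theorem not_mem_dropn (ls : List Char) (ch : Char) (a : Nat)
    (h : ∀ x, a ≤ x → x < ls.length → ls.getD x ' ' ≠ ch) : ch ∉ ls.drop a := by
  have := not_mem_seg ls ch a ls.length (le_refl _) h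
  rwa [List.take_of_length_le (by simp)] at this

theorem decomp_at (ls : List Char) (a u : Nat) (hau : a ≤ u) (hu : u < ls.length)
    (hvu : ls.getD u ' ' = 'v') :
    ls.drop a = (ls.drop a).take (u - a) ++ 'v' :: ls.drop (u + 1) := by
  conv_lhs => rw [← List.take_append_drop (u - a) (ls.drop a)]
  congr 1
  rw [List.drop_drop]
  have h1 : a + (u - a) = u := by omega
  rw [h1, List.drop_eq_getElem_cons hu]
  congr 1
  rw [List.getD_eq_getElem ls ' ' hu] at hvu
  exact hvu

-- takeWhile prefix of the inner scan when the next 'v' is at u > i (no wrap)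

theorem pre_lin (ls : List Char) (i u : Nat) (hi : i < ls.length) (hu : u < ls.length)
    (hiu : i < u) (hvu : ls.getD u ' ' = 'v')
    (hmin : ∀ x, i < x → x < u → ls.getD x ' ' ≠ 'v') :
    (cyc ls (i + 1) (ls.length - 1)).takeWhile (· ≠ 'v') = (ls.drop (i + 1)).take (u - i - 1) := by
  have hk : u - i - 1 < ls.length - 1 := by omega
  have htw := twgen (fun x => decide (x ≠ 'v')) (cyc ls (i + 1) (ls.length - 1)) (u - i - 1)
    (by rw [cyc_length]; omega)
    (by
      intro m hm
      rw [cyc_getElem ls (i + 1) (ls.length - 1) m (by omega)]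
      have : (i + 1 + m) % ls.length = i + 1 + m := Nat.mod_eq_of_lt (by omega)
      rw [this]
      exact decide_eq_true (hmin (i + 1 + m) (by omega) (by omega)))
    (by
      rw [cyc_getElem ls (i + 1) (ls.length - 1) (u - i - 1) (by omega)]
      have : (i + 1 + (u - i - 1)) % ls.length = u := by
        rw [show i + 1 + (u - i - 1) = u by omega]; exact Nat.mod_eq_of_lt hu
      rw [this, hvu]
      simp)
  rw [htw, cyc_take]
  rw [show min (u - i - 1) (ls.length - 1) = u - i - 1 by omega]
  exact cyc_lin ls (i + 1) (u - i - 1) (by omega) (by omega)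

-- takeWhile prefix of the inner scan when there is no 'v' after i: it wraps to v0

theorem pre_wrap (ls : List Char) (i v0 : Nat) (hi : i < ls.length) (hv0i : v0 < i)
    (hvv0 : ls.getD v0 ' ' = 'v') (hminv : ∀ x, x < v0 → ls.getD x ' ' ≠ 'v')
    (hnov : ∀ x, i < x → x < ls.length → ls.getD x ' ' ≠ 'v') :
    (cyc ls (i + 1) (ls.length - 1)).takeWhile (· ≠ 'v') = ls.drop (i + 1) ++ ls.take v0 := by
  set c := ls.length with hc
  have hk : (c - i - 1) + v0 < c - 1 := by omega
  have htw := twgen (fun x => decide (x ≠ 'v')) (cyc ls (i + 1) (c - 1)) ((c - i - 1) + v0)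
    (by rw [cyc_length]; omega)
    (by
      intro m hm
      rw [cyc_getElem ls (i + 1) (c - 1) m (by omega)]
      rcases Nat.lt_or_ge m (c - i - 1) with hcase | hcase
      · have : (i + 1 + m) % c = i + 1 + m := Nat.mod_eq_of_lt (by omega)
        rw [this]
        exact decide_eq_true (hnov (i + 1 + m) (by omega) (by omega))
      · have : (i + 1 + m) % c = m - (c - i - 1) := by
          rw [show i + 1 + m = c + (m - (c - i - 1)) by omega, Nat.add_mod_left]
          exact Nat.mod_eq_of_lt (by omega)
        rw [this]
        exact decide_eq_true (hminv (m - (c - i - 1)) (by omega)))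
    (by
      rw [cyc_getElem ls (i + 1) (c - 1) ((c - i - 1) + v0) (by omega)]
      have : (i + 1 + ((c - i - 1) + v0)) % c = v0 := by
        rw [show i + 1 + ((c - i - 1) + v0) = c + v0 by omega, Nat.add_mod_left]
        exact Nat.mod_eq_of_lt (by omega)
      rw [this, hvv0]
      simp)
  rw [htw, cyc_take]
  rw [show min ((c - i - 1) + v0) (c - 1) = (c - i - 1) + v0 by omega]
  rw [cyc_split]
  congr 1
  · rw [cyc_lin ls (i + 1) (c - i - 1) (by omega) (by omega)]
    rw [List.take_of_length_le (by simp; omega)]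
  · rw [show i + 1 + (c - i - 1) = c by omega, cyc_mod]
    rw [Nat.mod_self]
    rw [cyc_lin ls 0 v0 (by omega) (by omega)]
    simp

theorem mem_seg (ls : List Char) (ch : Char) (a b x : Nat) (hax : a ≤ x) (hxb : x < b)
    (hb : b ≤ ls.length) (hx : ls.getD x ' ' = ch) : ch ∈ (ls.drop a).take (b - a) := by
  rw [List.mem_iff_getElem]
  refine ⟨x - a, by simp; omega, ?_⟩
  rw [List.getElem_take, List.getElem_drop]
  rw [← List.getD_eq_getElem ls ' ' (by omega), show a + (x - a) = x by omega]
  exact hx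

theorem dw_seg (ls : List Char) (a g n : Nat) (hag : a ≤ g) (hg : g < ls.length)
    (hgn : g - a < n) (hn : n ≤ ls.length - a)
    (hgt : ls.getD g ' ' = '>') (hmin : ∀ x, a ≤ x → x < g → ls.getD x ' ' ≠ '>') :
    ((ls.drop a).take n).dropWhile (· ≠ '>') = ((ls.drop a).take n).drop (g - a) := by
  refine dwgen _ _ (g - a) (by simp; omega) ?_ ?_
  · intro m hm
    have hmn : m < n := by omega
    rw [List.getElem_take, List.getElem_drop]
    refine decide_eq_true ?_
    rw [← List.getD_eq_getElem ls ' ' (by omega)]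
    exact hmin (a + m) (by omega) (by omega)
  · rw [List.getElem_take, List.getElem_drop]
    rw [← List.getD_eq_getElem ls ' ' (by omega), show a + (g - a) = g by omega, hgt]
    simp

theorem seg_drop_within (ls : List Char) (a b d : Nat) :
    ((ls.drop a).take b).drop d = (ls.drop (a + d)).take (b - d) := by
  rw [List.drop_take, List.drop_drop]

theorem gval_seg (ls : List Char) (a u g : Nat) (hag : a ≤ g) (hgu : g < u)
    (hu : u ≤ ls.length) (hg : g < ls.length) (hgt : ls.getD g ' ' = '>')
    (hmin : ∀ x, a ≤ x → x < g → ls.getD x ' ' ≠ '>') :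
    gval ((ls.drop a).take (u - a)) = ((ls.drop (g + 1)).take (u - g - 1)).count '*' := by
  rw [gval, if_pos (mem_seg ls '>' a u g hag hgu hu hgt)]
  rw [dw_seg ls a g (u - a) hag hg (by omega) (by omega) hgt hmin]
  rw [List.tail_drop, seg_drop_within]
  rw [show a + (g - a + 1) = g + 1 by omega, show u - a - (g - a + 1) = u - g - 1 by omega]

theorem gval_seg0 (ls : List Char) (a u : Nat) (hu : u ≤ ls.length)
    (hmin : ∀ x, a ≤ x → x < u → ls.getD x ' ' ≠ '>') :
    gval ((ls.drop a).take (u - a)) = 0 :=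
  gval_not_mem _ (not_mem_seg ls '>' a u hu hmin)

theorem dw_dropn (ls : List Char) (a g : Nat) (hag : a ≤ g) (hg : g < ls.length)
    (hgt : ls.getD g ' ' = '>') (hmin : ∀ x, a ≤ x → x < g → ls.getD x ' ' ≠ '>') :
    ((ls.drop a).dropWhile (· ≠ '>')).tail = ls.drop (g + 1) := by
  have h := dw_seg ls a g (ls.length - a) hag hg (by omega) (by omega) hgt hmin
  rw [List.take_of_length_le (by simp)] at h
  rw [h, List.tail_drop, List.drop_drop]
  congr 1
  omega

theorem chain (ls : List Char) (v0 : Nat) (hv0 : v0 < ls.length)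
    (hvv0 : ls.getD v0 ' ' = 'v') (hminv : ∀ x, x < v0 → ls.getD x ' ' ≠ 'v') :
    ∀ k a m, v0 < a → a ≤ ls.length → ls.length - a ≤ k →
    Arun ls a m = max m (linMax ((ls.take v0).count '*') (ls.drop a)) := by
  intro k
  induction k with
  | zero =>
    intro a m h1 h2 h3
    rw [show a = ls.length by omega, Arun_end ls ls.length m (by omega),
      List.drop_length, linMax_nil]
    omega
  | succ k ih =>
    intro a m h1 h2 h3
    rcases Nat.eq_or_lt_of_le h2 with hac | hac
    · rw [hac, Arun_end ls ls.length m (by omega), List.drop_length, linMax_nil]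
      omega
    by_cases hexg : ∃ g, a ≤ g ∧ g < ls.length ∧ ls.getD g ' ' = '>'
    · obtain ⟨g, hag, hgc, hggt, hgmin⟩ :
          ∃ g, a ≤ g ∧ g < ls.length ∧ ls.getD g ' ' = '>' ∧
            ∀ x, a ≤ x → x < g → ls.getD x ' ' ≠ '>' := by
        have hgc' := (Nat.find_spec hexg).2.1
        refine ⟨Nat.find hexg, (Nat.find_spec hexg).1, hgc',
          (Nat.find_spec hexg).2.2, ?_⟩
        intro x hax hxg he
        exact Nat.find_min hexg hxg ⟨hax, by omega, he⟩
      by_cases hexu : ∃ u, a ≤ u ∧ u < ls.length ∧ ls.getD u ' ' = 'v'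
      · obtain ⟨u, hau, huc, hvu, humin⟩ :
            ∃ u, a ≤ u ∧ u < ls.length ∧ ls.getD u ' ' = 'v' ∧
              ∀ x, a ≤ x → x < u → ls.getD x ' ' ≠ 'v' := by
          have huc' := (Nat.find_spec hexu).2.1
          refine ⟨Nat.find hexu, (Nat.find_spec hexu).1, huc',
            (Nat.find_spec hexu).2.2, ?_⟩
          intro x hax hxu he
          exact Nat.find_min hexu hxu ⟨hax, by omega, he⟩
        rcases lt_trichotomy u g with hug | heq | hgu
        · -- a v-block with no '>' before the next 'v'
          have hskip2 : Arun ls a m = Arun ls (u + 1) m :=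
            Arun_skipR ls a (u + 1) m (by omega) (by omega)
              (fun x hx1 hx2 => hgmin x hx1 (by omega))
          rw [hskip2, ih (u + 1) m (by omega) (by omega) (by omega)]
          conv_rhs => rw [decomp_at ls a u hau huc hvu]
          rw [linMax_block _ _ _ (not_mem_seg ls 'v' a u (by omega) humin)]
          rw [gval_seg0 ls a u (by omega) (fun x hx1 hx2 => hgmin x hx1 (by omega))]
          omega
        · rw [heq, hggt] at hvu; simp at hvu
        · -- process the '>' at g; the next 'v' is at u, ahead of g
          rw [Arun_skipR ls a g m hag (by omega) hgmin, Arun_proc ls g m hgc hggt]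
          simp only []
          rw [pre_lin ls g u hgc huc hgu hvu (fun x hx1 hx2 => humin x (by omega) hx2)]
          have hlen : ((ls.drop (g + 1)).take (u - g - 1)).length = u - g - 1 := by
            simp; omega
          rw [hlen, show g + 1 + (u - g - 1) = u by omega,
            Nat.mod_eq_of_lt (by omega : u < ls.length)]
          rw [hvu]
          simp only [eq_self_iff_true, if_true]
          rw [if_pos hgu, ih (u + 1) _ (by omega) (by omega) (by omega)]
          conv_rhs => rw [decomp_at ls a u hau huc hvu]
          rw [linMax_block _ _ _ (not_mem_seg ls 'v' a u (by omega) humin)]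
          rw [gval_seg ls a u g hag hgu (by omega) hgc hggt hgmin]
          omega
      · -- no 'v' ahead: the inner scan wraps around to v0 and the outer loop breaks
        have hnov : ∀ x, g < x → x < ls.length → ls.getD x ' ' ≠ 'v' := by
          intro x hx1 hx2 he
          exact hexu ⟨x, by omega, hx2, he⟩
        rw [Arun_skipR ls a g m hag (by omega) hgmin, Arun_proc ls g m hgc hggt]
        simp only []
        rw [pre_wrap ls g v0 hgc (by omega) hvv0 hminv hnov]
        have hlen : (ls.drop (g + 1) ++ ls.take v0).length = (ls.length - g - 1) + v0 := by
          simp; omega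
        rw [hlen, show g + 1 + (ls.length - g - 1 + v0) = ls.length + v0 by omega,
          Nat.add_mod_left, Nat.mod_eq_of_lt (by omega : v0 < ls.length)]
        rw [hvv0]
        simp only [eq_self_iff_true, if_true]
        rw [if_neg (by omega : ¬ v0 > g)]
        have hvnd : 'v' ∉ ls.drop a :=
          not_mem_dropn ls 'v' a (fun x hx1 hx2 => by
            intro he; exact hexu ⟨x, hx1, hx2, he⟩)
        rw [linMax_not_mem _ _ hvnd, tailVal,
          if_pos ((by
            have := mem_seg ls '>' a ls.length g hag hgc (le_refl ls.length) hggt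
            rwa [List.take_of_length_le (by simp)] at this) : '>' ∈ ls.drop a)]
        rw [dw_dropn ls a g hag hgc hggt hgmin]
        rw [List.count_append]
        omega
    · -- no '>' ahead at all: nothing more is collected
      have hno : ∀ x, a ≤ x → x < ls.length → ls.getD x ' ' ≠ '>' := by
        intro x hx1 hx2 he
        exact hexg ⟨x, hx1, hx2, he⟩
      rw [Arun_skipR ls a ls.length m (by omega) (le_refl ls.length) hno,
        Arun_end ls ls.length m (by omega)]
      rw [linMax_no_gt _ _ (not_mem_dropn ls '>' a hno)]
      omega

theorem cyc_mem (ls : List Char) (s k : Nat) (hc : 0 < ls.length) :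
    ∀ x ∈ cyc ls s k, x ∈ ls := by
  intro x hx
  obtain ⟨t, _, he⟩ := List.mem_map.mp hx
  rw [List.getD_eq_getElem ls ' ' (Nat.mod_lt _ hc)] at he
  exact he ▸ List.getElem_mem _

theorem nov (ls : List Char) (hnov : 'v' ∉ ls) :
    ∀ k a m, ls.length - a ≤ k → Arun ls a m = m := by
  intro k
  induction k with
  | zero =>
    intro a m h
    exact Arun_end ls a m (by omega)
  | succ k ih =>
    intro a m h
    rcases Nat.lt_or_ge a ls.length with hac | hac
    · by_cases hgt : ls.getD a ' ' = '>'
      · rw [Arun_proc ls a m hac hgt]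
        simp only []
        have hfull : (cyc ls (a + 1) (ls.length - 1)).takeWhile (· ≠ 'v') =
            cyc ls (a + 1) (ls.length - 1) := by
          apply twfull
          intro x hx
          refine decide_eq_true (fun he => hnov ?_)
          exact he ▸ cyc_mem ls (a + 1) (ls.length - 1) (by omega) x hx
        rw [hfull, cyc_length, show a + 1 + (ls.length - 1) = a + ls.length by omega,
          Nat.add_mod_right, Nat.mod_eq_of_lt hac]
        rw [if_neg (by omega : ¬ a > a),
          if_neg (show ¬ ls.getD a ' ' = 'v' by rw [hgt]; decide)]
      · rw [Arun_skip ls a m hac hgt]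
        exact ih (a + 1) m (by omega)
    · exact Arun_end ls a m (by omega)

theorem phase1 (ls : List Char) (v0 : Nat) (hv0 : v0 < ls.length)
    (hvv0 : ls.getD v0 ' ' = 'v') (hminv : ∀ x, x < v0 → ls.getD x ' ' ≠ 'v') :
    Arun ls 0 0 = max (gval (ls.take v0))
      (linMax ((ls.take v0).count '*') (ls.drop (v0 + 1))) := by
  by_cases hexg : ∃ g, g < v0 ∧ ls.getD g ' ' = '>'
  · obtain ⟨g, hgv0, hggt, hgmin⟩ :
        ∃ g, g < v0 ∧ ls.getD g ' ' = '>' ∧ ∀ x, x < g → ls.getD x ' ' ≠ '>' := by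
      have hgv0' := (Nat.find_spec hexg).1
      refine ⟨Nat.find hexg, hgv0', (Nat.find_spec hexg).2, ?_⟩
      intro x hxg he
      exact Nat.find_min hexg hxg ⟨by omega, he⟩
    rw [Arun_skipR ls 0 g 0 (by omega) (by omega) (fun x h1 h2 => hgmin x h2),
      Arun_proc ls g 0 (by omega) hggt]
    simp only []
    rw [pre_lin ls g v0 (by omega) hv0 hgv0 hvv0 (fun x h1 h2 => hminv x h2)]
    have hlen : ((ls.drop (g + 1)).take (v0 - g - 1)).length = v0 - g - 1 := by
      simp; omega
    rw [hlen, show g + 1 + (v0 - g - 1) = v0 by omega,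
      Nat.mod_eq_of_lt (by omega : v0 < ls.length)]
    rw [hvv0]
    simp only [eq_self_iff_true, if_true]
    rw [if_pos (by omega : v0 > g),
      chain ls v0 hv0 hvv0 hminv ls.length (v0 + 1) _ (by omega) (by omega) (by omega)]
    have hgv : gval (ls.take v0) = ((ls.drop (g + 1)).take (v0 - g - 1)).count '*' := by
      have := gval_seg ls 0 v0 g (by omega) (by omega) (by omega) (by omega) hggt
        (fun x h1 h2 => hgmin x h2)
      simpa using this
    rw [hgv]
    omega
  · have hno : ∀ x, 0 ≤ x → x < v0 + 1 → ls.getD x ' ' ≠ '>' := by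
      intro x _ hx he
      rcases Nat.lt_or_ge x v0 with h | h
      · exact hexg ⟨x, h, he⟩
      · have : x = v0 := by omega
        rw [this, hvv0] at he
        simp at he
    rw [Arun_skipR ls 0 (v0 + 1) 0 (by omega) (by omega) hno,
      chain ls v0 hv0 hvv0 hminv ls.length (v0 + 1) _ (by omega) (by omega) (by omega)]
    have hgv : gval (ls.take v0) = 0 := by
      apply gval_not_mem
      have := not_mem_seg ls '>' 0 v0 (by omega) (fun x h1 h2 he => hexg ⟨x, h2, he⟩)
      simpa using this
    rw [hgv]

theorem gval_cons (x : Char) (l : List Char) (h : x ≠ '>') : gval (x :: l) = gval l := by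
  unfold gval
  by_cases hm : '>' ∈ l
  · rw [if_pos (List.mem_cons_of_mem _ hm), if_pos hm,
      List.dropWhile_cons, if_pos (by simpa using h)]
  · rw [if_neg (by
      simp only [List.mem_cons, not_or]
      exact ⟨fun he => h he.symm, hm⟩), if_neg hm]

theorem gval_cons_gt (l : List Char) : gval ('>' :: l) = l.count '*' := by
  unfold gval
  rw [if_pos List.mem_cons_self, List.dropWhile_cons, if_neg (by simp)]
  simp

theorem ff_block (X Y : List Char) (m coins : Nat) (flag : Bool) (h : 'v' ∉ X) :
    (X ++ 'v' :: Y).foldl bStep (m, flag, coins) =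
      Y.foldl bStep (max m (coins + if flag then X.count '*' else gval X), false, 0) := by
  induction X generalizing m coins flag with
  | nil =>
    simp only [List.nil_append, List.foldl_cons]
    have hb : bStep (m, flag, coins) 'v' = (max m coins, false, 0) := by
      unfold bStep
      rw [if_neg (by decide), if_neg (by simp), if_pos rfl]
      have : (if coins > m then coins else m) = max m coins := by split_ifs <;> omega
      rw [this]
    rw [hb]
    congr 2
    rw [gval_not_mem [] (by simp)]
    cases flag <;> simp
  | cons x X ih =>
    have hxv : x ≠ 'v' := fun he => h (he ▸ List.mem_cons_self)
    have hX : 'v' ∉ X := fun hm => h (List.mem_cons_of_mem _ hm)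
    simp only [List.cons_append, List.foldl_cons]
    by_cases hx1 : x = '>'
    · have hb : bStep (m, flag, coins) x = (m, true, coins) := by
        unfold bStep
        rw [if_pos hx1]
      rw [hb, ih m coins true hX]
      congr 3
      subst hx1
      rw [gval_cons_gt]
      cases flag
      · simp
      · simp [List.count_cons]
        
    · by_cases hx2 : x = '*'
      · cases flag with
        | true =>
          have hb : bStep (m, true, coins) x = (m, true, coins + 1) := by
            unfold bStep
            rw [if_neg hx1, if_pos ⟨hx2, rfl⟩]
          rw [hb, ih m (coins + 1) true hX]
          congr 3
          subst hx2
          simp [List.count_cons]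
          omega
        | false =>
          have hb : bStep (m, false, coins) x = (m, false, coins) := by
            unfold bStep
            rw [if_neg hx1, if_neg (by simp), if_neg hxv]
          rw [hb, ih m coins false hX]
          congr 3
          rw [if_neg (by simp), if_neg (by simp)]
          rw [gval_cons x X (by simpa using hx1)]
      · have hb : bStep (m, flag, coins) x = (m, flag, coins) := by
          unfold bStep
          rw [if_neg hx1, if_neg (by simp [hx2]), if_neg hxv]
        rw [hb, ih m coins flag hX]
        congr 3
        cases flag
        · rw [if_neg (by simp), if_neg (by simp)]
          rw [gval_cons x X (by simpa using hx1)]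
        · simp [List.count_cons, hx2, fun he : '*' = x => hx2 he.symm]

theorem dw_head (p : Char → Bool) (l : List Char) (a : Char) (t : List Char)
    (h : l.dropWhile p = a :: t) : ¬ p a := by
  induction l with
  | nil => simp at h
  | cons x xs ih =>
    rw [List.dropWhile_cons] at h
    by_cases hp : p x
    · rw [if_pos hp] at h
      exact ih h
    · rw [if_neg hp] at h
      cases h
      exact hp

theorem split_v (l : List Char) (h : 'v' ∈ l) :
    l = l.takeWhile (· ≠ 'v') ++ 'v' :: (l.dropWhile (· ≠ 'v')).tail ∧
      'v' ∉ l.takeWhile (· ≠ 'v') := by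
  have hne : l.dropWhile (· ≠ 'v') ≠ [] := by
    simp only [ne_eq, List.dropWhile_eq_nil_iff]
    intro hall; exact absurd (hall 'v' h) (by simp)
  constructor
  · cases hd : l.dropWhile (· ≠ 'v') with
    | nil => exact absurd hd hne
    | cons a t =>
      have ha : a = 'v' := by
        have := dw_head _ l a t hd
        simpa using this
      conv_lhs => rw [← List.takeWhile_append_dropWhile (p := (· ≠ 'v')) (l := l)]
      rw [hd, ha]
      simp
  · intro hm
    have := List.mem_takeWhile_imp hm
    simp at this

theorem bridge (P0 : List Char) (hP0 : 'v' ∉ P0) (sw : Nat) (hsw : sw = P0.count '*') :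
    ∀ D m, ((D ++ (P0 ++ ['v'])).foldl bStep (m, false, 0)).1 =
      max m (max (gval P0) (linMax sw D)) := by
  intro D
  induction hn : D.length using Nat.strong_induction_on generalizing D with
  | _ n ih =>
    intro m
    by_cases hv : 'v' ∈ D
    · obtain ⟨hsplit, htwv⟩ := split_v D hv
      conv_lhs => rw [hsplit]
      rw [List.append_assoc, List.cons_append]
      rw [ff_block _ _ m 0 false htwv]
      have hlt : ((D.dropWhile (· ≠ 'v')).tail).length < n := by
        have hne : D.dropWhile (· ≠ 'v') ≠ [] := by
          simp only [ne_eq, List.dropWhile_eq_nil_iff]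
          intro hall; exact absurd (hall 'v' hv) (by simp)
        have h1' : (D.dropWhile (· ≠ 'v')).length ≤ D.length := List.length_dropWhile_le _ _
        cases hd : D.dropWhile (· ≠ 'v') with
        | nil => exact absurd hd hne
        | cons a t => rw [hd] at h1'; simp at h1' ⊢; omega
      rw [ih _ hlt _ rfl]
      conv_rhs => rw [linMax]
      rw [dif_pos hv]
      simp only [Bool.false_eq_true, if_false]
      omega
    · have hDP : 'v' ∉ D ++ P0 := by
        intro hm
        rcases List.mem_append.mp hm with hm | hm
        · exact hv hm
        · exact hP0 hm
      rw [show D ++ (P0 ++ ['v']) = (D ++ P0) ++ 'v' :: [] by simp]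
      rw [ff_block _ _ m 0 false hDP]
      simp only [List.foldl_nil]
      rw [linMax_not_mem sw D hv]
      by_cases hgt : '>' ∈ D
      · rw [gval_append_left D P0 hgt, tailVal, if_pos hgt]
        have hle : gval P0 ≤ P0.count '*' := gval_le_count P0
        simp only [Bool.false_eq_true, if_false]
        omega
      · rw [gval_append_right D P0 hgt, tailVal, if_neg hgt]
        simp only [Bool.false_eq_true, if_false]
        omega

theorem idxOf_min (l : List Char) (a : Char) :
    ∀ m, m < l.idxOf a → ∀ hm : m < l.length, l[m] ≠ a := by
  induction l with
  | nil => intro m h; simp [List.idxOf_nil] at h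
  | cons x xs ih =>
    intro m h hm
    rw [List.idxOf_cons] at h
    by_cases hx : x = a
    · simp [hx] at h
    · cases m with
      | zero => simpa using hx
      | succ m' =>
        rw [show (x == a) = false by simpa using hx] at h
        simp only [Bool.cond_false] at h
        have := ih m' (by omega) (by simpa using hm)
        simpa using this

theorem cyc_all (ls : List Char) (s : Nat) (hs : s ≤ ls.length) :
    cyc ls s ls.length = ls.drop s ++ ls.take s := by
  rw [show ls.length = (ls.length - s) + s by omega, cyc_split]
  congr 1
  · rw [cyc_lin ls s (ls.length - s) hs (by omega), List.take_of_length_le (by simp)]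
  · rw [show s + (ls.length - s) = ls.length by omega, cyc_mod, Nat.mod_self,
      cyc_lin ls 0 s (by omega) (by omega)]
    simp

theorem coreAB (cl : List Char) :
    Arun cl 0 0 =
      (if 'v' ∈ cl then
        ((List.range cl.length).foldl
          (fun st t => bStep st (cl.getD ((cl.idxOf 'v' + (t + 1)) % cl.length) ' '))
          (0, false, 0)).1
      else 0) := by
  by_cases hv : 'v' ∈ cl
  · rw [if_pos hv]
    have hlt : cl.idxOf 'v' < cl.length := List.idxOf_lt_length_of_mem hv
    have hget : cl[cl.idxOf 'v']'hlt = 'v' := List.getElem_idxOf hlt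
    have hgetD : cl.getD (cl.idxOf 'v') ' ' = 'v' := by
      rw [List.getD_eq_getElem cl ' ' hlt, hget]
    have hmin : ∀ x, x < cl.idxOf 'v' → cl.getD x ' ' ≠ 'v' := by
      intro x hx
      rw [List.getD_eq_getElem cl ' ' (by omega)]
      exact idxOf_min cl 'v' x hx (by omega)
    have hnmem : 'v' ∉ cl.take (cl.idxOf 'v') := by
      have := not_mem_seg cl 'v' 0 (cl.idxOf 'v') (by omega) (fun x _ hx2 => hmin x hx2)
      simpa using this
    rw [phase1 cl (cl.idxOf 'v') hlt hgetD hmin]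
    have hfold : (List.range cl.length).foldl
        (fun st t => bStep st (cl.getD ((cl.idxOf 'v' + (t + 1)) % cl.length) ' '))
        ((0 : Nat), false, (0 : Nat)) =
        (cyc cl (cl.idxOf 'v' + 1) cl.length).foldl bStep (0, false, 0) := by
      rw [cyc, List.foldl_map]
      apply List.foldl_ext
      intro st t _
      rw [show cl.idxOf 'v' + (t + 1) = cl.idxOf 'v' + 1 + t by omega]
    rw [hfold, cyc_all cl (cl.idxOf 'v' + 1) (by omega)]
    have htake : cl.take (cl.idxOf 'v' + 1) = cl.take (cl.idxOf 'v') ++ ['v'] := by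
      rw [List.take_succ]
      congr 1
      rw [List.getElem?_eq_getElem hlt, hget]
      rfl
    rw [htake, bridge (cl.take (cl.idxOf 'v')) hnmem _ rfl (cl.drop (cl.idxOf 'v' + 1)) 0]
    omega
  · rw [if_neg hv]
    exact nov cl hv cl.length 0 0 (by omega)

theorem inner_j_lt (ls : List Char) (c i : Nat) :
    ∀ fuel j coins, j < c → (innerA ls c i fuel j coins).2 < c := by
  intro fuel
  induction fuel with
  | zero => intro j coins hj; exact hj
  | succ fuel ih =>
    intro j coins hj
    unfold innerA
    split
    · exact ih _ _ (Nat.mod_lt _ (by omega))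
    · exact hj

theorem cong_inner (ls ls' : List Char) (c i : Nat)
    (hagree : ∀ k, k < c → ls.getD k ' ' = ls'.getD k ' ') :
    ∀ fuel j coins, j < c → innerA ls c i fuel j coins = innerA ls' c i fuel j coins := by
  intro fuel
  induction fuel with
  | zero => intro j coins _; rfl
  | succ fuel ih =>
    intro j coins hj
    unfold innerA
    rw [hagree j hj]
    split
    · exact ih _ _ (Nat.mod_lt _ (by omega))
    · rfl

theorem cong_outer (ls ls' : List Char) (c : Nat)
    (hagree : ∀ k, k < c → ls.getD k ' ' = ls'.getD k ' ') :
    ∀ fuel i m, outerA ls c fuel i m = outerA ls' c fuel i m := by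
  intro fuel
  induction fuel with
  | zero => intro i m; rfl
  | succ fuel ih =>
    intro i m
    unfold outerA
    by_cases hic : i < c
    · simp only [hic, if_true]
      rw [hagree i hic]
      by_cases hgt : ls'.getD i ' ' = '>'
      · simp only [hgt, if_true]
        rw [cong_inner ls ls' c i hagree c ((i + 1) % c) 0 (Nat.mod_lt _ (by omega))]
        have hjlt : (innerA ls' c i c ((i + 1) % c) 0).2 < c :=
          inner_j_lt ls' c i c ((i + 1) % c) 0 (Nat.mod_lt _ (by omega))
        rw [hagree _ hjlt]
        split
        · exact ih _ _
        · rfl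
      · simp only [hgt, if_false]
        exact ih _ _
    · simp only [hic, if_false]

theorem final (row : String) (C : Int) (hpre : C ≤ (row.toList.length : Int)) :
    getNumCoinsBetweenTurns row C = getNumCoinsBetweenTurns_alt row C := by
  have hn : C.toNat ≤ row.toList.length := by omega
  have hlen : ((List.range C.toNat).map (fun k => row.toList.getD k ' ')).length = C.toNat := by
    simp
  have hagree : ∀ k, k < C.toNat →
      row.toList.getD k ' ' =
        ((List.range C.toNat).map (fun k => row.toList.getD k ' ')).getD k ' ' := by
    intro k hk
    conv_rhs => rw [List.getD_eq_getElem _ ' ' (by rw [hlen]; exact hk)]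
    simp
  unfold getNumCoinsBetweenTurns getNumCoinsBetweenTurns_alt
  simp only []
  rw [cong_outer row.toList _ C.toNat hagree (C.toNat + 1) 0 0]
  have hA : outerA ((List.range C.toNat).map (fun k => row.toList.getD k ' ')) C.toNat
      (C.toNat + 1) 0 0 = Arun ((List.range C.toNat).map (fun k => row.toList.getD k ' ')) 0 0 := by
    unfold Arun
    rw [hlen]
  rw [hA, coreAB _, hlen]
  by_cases hv : 'v' ∈ (List.range C.toNat).map (fun k => row.toList.getD k ' ')
  · rw [if_pos hv, if_neg (not_not_intro hv)]
  · rw [if_neg hv, if_pos hv]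
    rfl

-- ===== VERDICT (by name: the statement is the Claim_ definition above) =====
theorem getNumCoinsBetweenTurns_spec : Claim_equal_getNumCoinsBetweenTurns := by
  intro row C _ hpre
  unfold Spec_getNumCoinsBetweenTurns
  exact final row C hpre
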